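-- pv_equiv track=rewrite | github.com/atolat/algorithms-lc | Microsoft/OA/largest-integer.py | largestint
-- ===== SOURCE A (Python) =====
-- def largestint(arr):
--     map = set()
--     largest = 0
--     for num in arr:
--         if -1 * num in map:
--             pos = num if num > 0 else num * -1
--             if pos > largest:
--                 largest = pos
--         else:
--             map.add(num)
--     return largest
-- ===== SOURCE B (Python) =====
-- def largestint(arr):
--     a = sorted(arr)
--     i, j = 0, len(a) - 1
--     while i < j:
--         s = a[i] + a[j]
--         if s == 0:
--             return a[j]
--         if s < 0:
--             i += 1
--         else:
--             j -= 1
--     return 0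
-- ===== Notes on version B (the rewrite author's own statement) =====
-- stated objective: alternative
-- what changed: A does one hash-set pass (test -num in seen, else insert, track max abs); B sorts the array and runs the classic two-pointer zero-sum scan from both ends, returning the first (hence largest) a[j] of a pair summing to 0, with no set or membership test at all.
import Mathlib
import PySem

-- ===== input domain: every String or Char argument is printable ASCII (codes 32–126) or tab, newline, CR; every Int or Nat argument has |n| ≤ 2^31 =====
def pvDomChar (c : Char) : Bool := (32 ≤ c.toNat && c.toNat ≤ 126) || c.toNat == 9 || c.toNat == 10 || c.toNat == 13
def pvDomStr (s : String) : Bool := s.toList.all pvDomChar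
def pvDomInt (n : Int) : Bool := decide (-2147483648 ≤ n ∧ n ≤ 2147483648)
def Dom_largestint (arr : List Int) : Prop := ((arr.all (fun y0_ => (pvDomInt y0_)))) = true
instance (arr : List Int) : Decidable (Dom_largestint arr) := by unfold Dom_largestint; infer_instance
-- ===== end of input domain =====

-- B sorts the array and runs the classic two-pointer zero-sum scan from both ends
-- instead of A's single hash-set pass (objective: alternative algorithm, no set at all).

-- ===== PORT A =====
-- one loop iteration of A: state (map, largest)
def stepA (st : List Int × Int) (num : Int) : List Int × Int :=
  if (-1 * num) ∈ st.1 then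
    let pos := if num > 0 then num else num * -1
    (st.1, if pos > st.2 then pos else st.2)
  else (PySem.Set.add st.1 num, st.2)

def largestint (arr : List Int) : Int :=
  (arr.foldl stepA ((PySem.Set.empty : PySem.Set Int), 0)).2

-- ===== PORT B =====
-- the while-loop of Source B on state (i, j); a[i]/a[j] via getD (both indices are
-- always in range while the loop runs, so this is exact for Python's a[i]/a[j])
def loopB (a : List Int) (i j : Nat) : Int :=
  if _h : i < j then
    if a.getD i 0 + a.getD j 0 = 0 then a.getD j 0
    else if a.getD i 0 + a.getD j 0 < 0 then loopB a (i + 1) j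
    else loopB a i (j - 1)
  else 0
termination_by j - i
decreasing_by all_goals omega

def largestint_alt (arr : List Int) : Int :=
  let a := PySem.List.sorted arr (fun x => x) false
  loopB a 0 (a.length - 1)

-- ===== PRECONDITION & SPEC =====
def Spec_largestint (arr : List Int) (out : Int) : Prop := out = largestint_alt arr
instance (arr : List Int) (out : Int) : Decidable (Spec_largestint arr out) := by unfold Spec_largestint; infer_instance

-- ===== CLAIM =====
def Claim_equal_largestint : Prop := ∀ (arr : List Int), Dom_largestint arr → Spec_largestint arr (largestint arr)

-- ===== LEMMAS AND PROOFS =====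

-- |y| exactly as A computes it
def pabs (y : Int) : Int := if y > 0 then y else -y

lemma pabs_neg (y : Int) : pabs (-y) = pabs y := by
  unfold pabs; split_ifs <;> omega

lemma le_pabs (y : Int) : y ≤ pabs y ∧ -y ≤ pabs y := by
  unfold pabs; split_ifs <;> omega

-- characterization of A's loop result from an arbitrary state
lemma loopA_char (xs : List Int) (m : List Int) (l : Int) (h0 : 0 ≤ l) :
    l ≤ (List.foldl stepA (m, l) xs).2 ∧
    ((List.foldl stepA (m, l) xs).2 = l ∨
      ∃ y, y ∈ xs ∧ (List.foldl stepA (m, l) xs).2 = pabs y ∧ ((-y) ∈ m ∨ (-y) ∈ xs)) ∧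
    (∀ y, y ∈ xs → ((-y) ∈ m ∨ (-y) ∈ xs) → pabs y ≤ (List.foldl stepA (m, l) xs).2) := by
  induction xs generalizing m l with
  | nil => simp
  | cons x xs ih =>
    rw [List.foldl_cons]
    by_cases hmem : (-1 * x) ∈ m
    · have hx : (-x) ∈ m := by simpa using hmem
      have hstep : stepA (m, l) x = (m, max l (pabs x)) := by
        simp only [stepA, if_pos hmem, pabs]
        split_ifs <;> simp_all <;> omega
      rw [hstep]
      obtain ⟨h1, h2, h3⟩ := ih m (max l (pabs x)) (le_trans h0 (le_max_left _ _))
      refine ⟨le_trans (le_max_left _ _) h1, ?_, ?_⟩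
      · rcases h2 with h2 | ⟨y, hy, hr, hc⟩
        · rcases max_choice l (pabs x) with hm | hm
          · left; rw [h2, hm]
          · right; exact ⟨x, by simp, by rw [h2, hm], Or.inl hx⟩
        · right; exact ⟨y, List.mem_cons_of_mem _ hy, hr, by tauto⟩
      · intro y hy hc
        rcases List.mem_cons.mp hy with rfl | hy'
        · exact le_trans (le_max_right _ _) h1
        · rcases hc with hc | hc
          · exact h3 y hy' (Or.inl hc)
          · rcases List.mem_cons.mp hc with hc' | hc'
            · have : pabs y = pabs x := by rw [← hc', pabs_neg]
              rw [this]; exact le_trans (le_max_right _ _) h1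
            · exact h3 y hy' (Or.inr hc')
    · have hstep : stepA (m, l) x = (PySem.Set.add m x, l) := by
        simp only [stepA, if_neg hmem]
      rw [hstep]
      obtain ⟨h1, h2, h3⟩ := ih (PySem.Set.add m x) l h0
      refine ⟨h1, ?_, ?_⟩
      · rcases h2 with h2 | ⟨y, hy, hr, hc⟩
        · exact Or.inl h2
        · refine Or.inr ⟨y, List.mem_cons_of_mem _ hy, hr, ?_⟩
          rcases hc with hc | hc
          · rcases (PySem.Set.mem_add _ _ _).mp hc with hc' | hc'
            · exact Or.inl hc'
            · exact Or.inr (by rw [hc']; simp)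
          · exact Or.inr (List.mem_cons_of_mem _ hc)
      · intro y hy hc
        rcases List.mem_cons.mp hy with rfl | hy'
        · rcases hc with hc | hc
          · exact absurd (by simpa using hc) hmem
          · rcases List.mem_cons.mp hc with hc' | hc'
            · have hy0 : y = 0 := by omega
              have : pabs y = 0 := by rw [hy0]; rfl
              rw [this]; exact le_trans h0 h1
            · have := h3 (-y) hc' (Or.inl ((PySem.Set.mem_add _ _ _).mpr (Or.inr (neg_neg y))))
              rwa [pabs_neg] at this
        · rcases hc with hc | hc
          · exact h3 y hy' (Or.inl ((PySem.Set.mem_add _ _ _).mpr (Or.inl hc)))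
          · rcases List.mem_cons.mp hc with hc' | hc'
            · exact h3 y hy' (Or.inl ((PySem.Set.mem_add _ _ _).mpr (Or.inr hc')))
            · exact h3 y hy' (Or.inr hc')

-- a "zero pair" of indices in a
def ZP (a : List Int) (p q : Nat) : Prop :=
  p < q ∧ q < a.length ∧ a.getD p 0 + a.getD q 0 = 0

-- characterization of the two-pointer loop on a sorted list:
-- the result is 0 or the second element of some zero pair, and it dominates
-- a.getD q 0 for every zero pair (p,q) — given the invariant that every zero
-- pair lies inside [i, j].
lemma loopB_char (a : List Int) (hs : ∀ p q : Nat, p ≤ q → q < a.length → a.getD p 0 ≤ a.getD q 0)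
    (i j : Nat) (hj : j < a.length)
    (hinv : ∀ p q, ZP a p q → i ≤ p ∧ q ≤ j) :
    (loopB a i j = 0 ∨ ∃ p q, ZP a p q ∧ loopB a i j = a.getD q 0) ∧
    (∀ p q, ZP a p q → a.getD q 0 ≤ loopB a i j) := by
  induction hd : j - i using Nat.strong_induction_on generalizing i j with
  | _ n ih =>
  by_cases hij : i < j
  · by_cases hz : a.getD i 0 + a.getD j 0 = 0
    · have heq : loopB a i j = a.getD j 0 := by rw [loopB, dif_pos hij, if_pos hz]
      rw [heq]
      exact ⟨Or.inr ⟨i, j, ⟨hij, hj, hz⟩, rfl⟩, fun p q hpq => hs q j (hinv p q hpq).2 hj⟩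
    · by_cases hneg : a.getD i 0 + a.getD j 0 < 0
      · have heq : loopB a i j = loopB a (i + 1) j := by
          rw [loopB, dif_pos hij, if_neg hz, if_pos hneg]
        rw [heq]
        have hinv' : ∀ p q, ZP a p q → i + 1 ≤ p ∧ q ≤ j := by
          intro p q hpq
          obtain ⟨hip, hqj⟩ := hinv p q hpq
          refine ⟨?_, hqj⟩
          rcases Nat.lt_or_ge i p with h | h
          · omega
          · exfalso
            have hpi : p = i := by omega
            have h1 : a.getD q 0 ≤ a.getD j 0 := hs q j hqj hj
            have h2 := hpq.2.2
            rw [hpi] at h2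
            omega
        exact ih (j - (i + 1)) (by omega) (i + 1) j hj hinv' rfl
      · have heq : loopB a i j = loopB a i (j - 1) := by
          rw [loopB, dif_pos hij, if_neg hz, if_neg hneg]
        rw [heq]
        have hinv' : ∀ p q, ZP a p q → i ≤ p ∧ q ≤ j - 1 := by
          intro p q hpq
          obtain ⟨hip, hqj⟩ := hinv p q hpq
          refine ⟨hip, ?_⟩
          rcases Nat.lt_or_ge q j with h | h
          · omega
          · exfalso
            have hqj' : q = j := by omega
            have h1 : a.getD i 0 ≤ a.getD p 0 := hs i p hip (by have := hpq.1; omega)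
            have h2 := hpq.2.2
            rw [hqj'] at h2
            omega
        exact ih ((j - 1) - i) (by omega) i (j - 1) (by omega) hinv' rfl
  · have heq : loopB a i j = 0 := by rw [loopB, dif_neg hij]
    rw [heq]
    refine ⟨Or.inl rfl, ?_⟩
    intro p q hpq
    have := hinv p q hpq
    have := hpq.1
    omega

-- sorted getD monotone
lemma sorted_getD_mono (arr : List Int) :
    ∀ p q : Nat, p ≤ q → q < (PySem.List.sorted arr (fun x => x) false).length →
      (PySem.List.sorted arr (fun x => x) false).getD p 0 ≤ (PySem.List.sorted arr (fun x => x) false).getD q 0 := by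
  intro p q hpq hq
  have hp : p < (PySem.List.sorted arr (fun x => x) false).length := lt_of_le_of_lt hpq hq
  rw [List.getD_eq_getElem _ _ hp, List.getD_eq_getElem _ _ hq]
  exact PySem.List.sorted_id_getElem_mono arr hpq hq

-- ===== VERDICT =====
theorem largestint_spec : Claim_equal_largestint := by
  intro arr _
  unfold Spec_largestint largestint largestint_alt
  obtain ⟨ha1, ha2, ha3⟩ := loopA_char arr ((PySem.Set.empty : PySem.Set Int)) 0 le_rfl
  set a := PySem.List.sorted arr (fun x => x) false with hadef
  have hmema : ∀ x : Int, x ∈ a ↔ x ∈ arr := by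
    rw [hadef]; intro x; exact PySem.List.mem_sorted arr (fun x => x) false x
  have hmono : ∀ p q : Nat, p ≤ q → q < a.length → a.getD p 0 ≤ a.getD q 0 := by
    rw [hadef]; exact sorted_getD_mono arr
  set rA := (List.foldl stepA ((PySem.Set.empty : PySem.Set Int), 0) arr).2 with hrA
  -- degenerate case: a = []
  rcases Nat.eq_zero_or_pos a.length with hlen | hlen
  · have harr : arr = [] := by
      have ha : a = [] := List.eq_nil_of_length_eq_zero hlen
      rw [hadef] at ha
      exact (PySem.List.sorted_eq_nil_iff arr (fun x => x) false).mp ha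
    subst harr
    have h0 : ¬ (0 < a.length - 1) := by omega
    rw [loopB, dif_neg h0]
    rfl
  · have hj : a.length - 1 < a.length := by omega
    have hinv0 : ∀ p q, ZP a p q → 0 ≤ p ∧ q ≤ a.length - 1 := by
      intro p q hpq
      exact ⟨Nat.zero_le _, by have := hpq.2.1; omega⟩
    obtain ⟨hb2, hb3⟩ := loopB_char a hmono 0 (a.length - 1) hj hinv0
    set rB := loopB a 0 (a.length - 1) with hrB
    -- rB ≥ 0: it is 0, or a.getD q 0 with a zero pair (p,q), and a.getD p ≤ a.getD q
    have hb0 : 0 ≤ rB := by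
      rcases hb2 with h | ⟨p, q, ⟨hpq, hq, hzero⟩, hr⟩
      · omega
      · have := hmono p q (le_of_lt hpq) hq
        omega
    -- from a member pair (y, -y in arr) to a bound on rB
    have hpair : ∀ y : Int, y ∈ arr → (-y) ∈ arr → pabs y ≤ rB := by
      intro y hy hny
      by_cases hy0 : pabs y = 0
      · omega
      · -- x := pabs y > 0; both x and -x are in arr (hence in a); indices give a zero pair
        have hxpos : 0 < pabs y := by
          unfold pabs at *; split_ifs at * <;> omega
        have hxmem : pabs y ∈ a ∧ (-(pabs y)) ∈ a := by
          constructor <;> rw [hmema] <;> unfold pabs <;> split_ifs with h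
          · exact hy
          · exact hny
          · exact hny
          · simpa using hy
        obtain ⟨q, hq, hqe⟩ := List.mem_iff_getElem.mp hxmem.1
        obtain ⟨p, hp, hpe⟩ := List.mem_iff_getElem.mp hxmem.2
        have hgq : a.getD q 0 = pabs y := by rw [List.getD_eq_getElem _ _ hq]; exact hqe
        have hgp : a.getD p 0 = -(pabs y) := by rw [List.getD_eq_getElem _ _ hp]; exact hpe
        have hplt : p < q := by
          rcases Nat.lt_or_ge p q with h | h
          · exact h
          · exfalso
            have := hmono q p h hp
            omega
        have := hb3 p q ⟨hplt, hq, by omega⟩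
        omega
    have hAB : rA ≤ rB := by
      rcases ha2 with h | ⟨y, hy, hr, hc⟩
      · omega
      · have hym : (-y) ∈ arr := by
          rcases hc with hc | hc
          · simp [PySem.Set.empty] at hc
          · exact hc
        have := hpair y hy hym
        omega
    have hBA : rB ≤ rA := by
      rcases hb2 with h | ⟨p, q, ⟨hpq, hq, hzero⟩, hr⟩
      · omega
      · have hp : p < a.length := lt_trans hpq hq
        have hqm : a.getD q 0 ∈ arr := by
          rw [← hmema, List.getD_eq_getElem _ _ hq]; exact List.getElem_mem hq
        have hpm : (-(a.getD q 0)) ∈ arr := by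
          have : a.getD p 0 = -(a.getD q 0) := by omega
          rw [← this, ← hmema, List.getD_eq_getElem _ _ hp]; exact List.getElem_mem hp
        have := ha3 _ hqm (Or.inr hpm)
        have := (le_pabs (a.getD q 0)).1
        omega
    omega
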